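-- pv_equiv track=rewrite | github.com/johannes-programming/lib_dzne_math | src/lib_dzne_math/numerals/__init__.py | alpha
-- ===== SOURCE A (Python) =====
-- def alpha(number):
--     ascii_uppercase = "".join(chr(n) for n in range(0x41, 0x5B))
--     digits = 1
--     while number >= (26 ** digits):
--         number -= (26 ** digits)
--         digits += 1
--     ans = ""
--     while len(ans) < digits:
--         number, r = divmod(number, 26)
--         ans = chr(0x41 + r) + ans
--     return ans
-- ===== SOURCE B (Python) =====
-- def alpha(number):
--     if number < 26:
--         return chr(0x41 + number % 26)
--     q, r = divmod(number - 26, 26)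
--     return alpha(q) + chr(0x41 + r)
-- ===== Notes on version B (the rewrite author's own statement) =====
-- stated objective: simpler
-- what changed: A's two-pass scheme (count digits by subtracting growing powers of 26, then extract that many digits with divmod) is replaced by a single recursive peel: for n < 26 one letter from n % 26, otherwise recurse on (n-26)//26 and append the letter for (n-26)%26.
import Mathlib
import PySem

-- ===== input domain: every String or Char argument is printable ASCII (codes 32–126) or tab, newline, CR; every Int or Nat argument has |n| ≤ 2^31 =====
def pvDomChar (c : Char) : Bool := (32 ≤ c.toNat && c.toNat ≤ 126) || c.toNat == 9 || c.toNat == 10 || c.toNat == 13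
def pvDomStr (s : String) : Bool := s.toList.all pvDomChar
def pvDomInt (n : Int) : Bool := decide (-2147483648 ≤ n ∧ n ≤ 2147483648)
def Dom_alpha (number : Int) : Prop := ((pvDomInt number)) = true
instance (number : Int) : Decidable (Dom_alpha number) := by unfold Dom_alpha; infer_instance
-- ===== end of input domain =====

-- B replaces A's two-pass scheme (digit count, then digit extraction) by a single recursive peel; objective: simpler.

-- ===== PORT A =====
-- one letter, chr(0x41 + r)
def alphaCh (r : Int) : Char := Char.ofNat (0x41 + r.toNat)

-- first while loop: while number >= 26**digits: number -= 26**digits; digits += 1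
def alphaLoop (number : Int) (digits : Nat) : Int × Nat :=
  if 26 ^ digits ≤ number then alphaLoop (number - 26 ^ digits) (digits + 1) else (number, digits)
termination_by number.toNat
decreasing_by
  have h1 : (1 : Int) ≤ 26 ^ digits := one_le_pow₀ (by norm_num)
  omega

-- second while loop: while len(ans) < digits: number, r = divmod(number, 26); ans = chr(0x41+r) + ans
-- (runs exactly `digits` times; built here by recursion on the remaining count, least-significant digit appended)
def alphaDigits (number : Int) : Nat → List Char
  | 0 => []
  | d + 1 => alphaDigits (PySem.Int.floordiv number 26) d ++ [alphaCh (PySem.Int.mod number 26)]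

def alpha (number : Int) : String :=
  String.ofList (alphaDigits (alphaLoop number 1).1 (alphaLoop number 1).2)

-- ===== PORT B =====
def alphaAltL (number : Int) : List Char :=
  if number < 26 then [alphaCh (PySem.Int.mod number 26)]
  else alphaAltL (PySem.Int.floordiv (number - 26) 26) ++ [alphaCh (PySem.Int.mod (number - 26) 26)]
termination_by number.toNat
decreasing_by
  have h0 : (0:Int) ≤ number - 26 := by omega
  have h := PySem.Int.floordiv_eq_ediv_of_pos (a := number - 26) (b := 26) (by norm_num)
  have h2 : (number - 26) / 26 ≤ number - 26 := Int.ediv_le_self _ h0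
  have h3 : (0:Int) ≤ (number - 26) / 26 := Int.ediv_nonneg h0 (by norm_num)
  omega

def alpha_alt (number : Int) : String := String.ofList (alphaAltL number)

-- ===== PRECONDITION & SPEC =====
def Spec_alpha (number : Int) (out : String) : Prop := out = alpha_alt number
instance (number : Int) (out : String) : Decidable (Spec_alpha number out) := by unfold Spec_alpha; infer_instance

-- ===== CLAIM (what is proved, stated in full; the proofs are below) =====
def Claim_equal_alpha : Prop := ∀ (number : Int), Dom_alpha number → Spec_alpha number (alpha number)

-- ===== LEMMAS AND PROOFS =====

-- divmod of 26*v + r with 0 ≤ r < 26 recovers (v, r)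
theorem fdiv_26_shift (v r : Int) (h0 : 0 ≤ r) (h1 : r < 26) :
    PySem.Int.floordiv (26 * v + r) 26 = v := by
  rw [PySem.Int.floordiv_eq_ediv_of_pos (by norm_num)]
  omega

theorem mod_26_shift (v r : Int) (h0 : 0 ≤ r) (h1 : r < 26) :
    PySem.Int.mod (26 * v + r) 26 = r := by
  rw [PySem.Int.mod_eq_emod_of_pos (by norm_num)]
  omega

-- A's first loop commutes with the base-26 shift n ↦ 26*n + r
theorem alphaLoop_shift (v : Int) (k : Nat) (r : Int) (h0 : 0 ≤ r) (h1 : r < 26) :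
    alphaLoop (26 * v + r) (k + 1) = (26 * (alphaLoop v k).1 + r, (alphaLoop v k).2 + 1) := by
  induction v, k using alphaLoop.induct with
  | case1 v k hle ih =>
    have hc : 26 ^ (k + 1) ≤ 26 * v + r := by
      have : (26:Int) ^ (k+1) = 26 * 26 ^ k := by ring
      omega
    have he : 26 * v + r - 26 ^ (k + 1) = 26 * (v - 26 ^ k) + r := by
      have : (26:Int) ^ (k+1) = 26 * 26 ^ k := by ring
      omega
    conv_lhs => rw [alphaLoop, if_pos hc, he, ih]
    conv_rhs => rw [alphaLoop, if_pos hle]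
  | case2 v k hlt =>
    have hc : ¬ 26 ^ (k + 1) ≤ 26 * v + r := by
      have : (26:Int) ^ (k+1) = 26 * 26 ^ k := by ring
      omega
    rw [alphaLoop, if_neg hc, alphaLoop, if_neg hlt]

-- key recurrence: A's list of letters satisfies B's recursion
theorem alphaL_eq_altL (number : Int) :
    alphaDigits (alphaLoop number 1).1 (alphaLoop number 1).2 = alphaAltL number := by
  induction number using alphaAltL.induct with
  | case1 n hlt =>
    have hc : ¬ (26:Int) ^ 1 ≤ n := by simpa using by omega
    rw [alphaAltL, if_pos hlt, alphaLoop, if_neg hc]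
    simp [alphaDigits]
  | case2 n hlt ih =>
    have h26 : (26:Int) ≤ n := by omega
    set q := PySem.Int.floordiv (n - 26) 26 with hq
    set r := PySem.Int.mod (n - 26) 26 with hr
    have hr0 : 0 ≤ r := PySem.Int.mod_nonneg _ (by norm_num)
    have hr1 : r < 26 := PySem.Int.mod_lt _ (by norm_num)
    have hqr : q * 26 + r = n - 26 := PySem.Int.floordiv_mul_add_mod (n - 26) 26
    have hn : n = 26 * (q + 1) + r := by omega
    have hstep : alphaLoop n 1 = alphaLoop (26 * q + r) 2 := by
      rw [alphaLoop]
      have : (26:Int) ^ 1 ≤ n := by simpa using h26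
      rw [if_pos this]
      have : n - 26 ^ 1 = 26 * q + r := by simpa using by omega
      rw [this]
    rw [alphaAltL, if_neg hlt, ← ih, hstep, alphaLoop_shift q 1 r hr0 hr1]
    rw [alphaDigits, fdiv_26_shift _ _ hr0 hr1, mod_26_shift _ _ hr0 hr1]

-- ===== VERDICT (by name: the statement is the Claim_ definition above) =====
theorem alpha_spec : Claim_equal_alpha := by
  intro number _
  unfold Spec_alpha alpha alpha_alt
  rw [alphaL_eq_altL]
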